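-- pv_equiv track=rewrite | github.com/adityakishor1/G-f-G_practise | Check if a string is repetition of its substring of k-length.py | kSubstrConcat
-- ===== SOURCE A (Python) =====
-- def kSubstrConcat(n, s, k):
-- 	if n % k != 0:
-- 	    return 0
-- 	mp = {}
-- 	for i in range(0, n, k):
-- 	    mp[s[i:i+k]] = mp.get(s[i:i+k], 0) + 1
-- 	if len(mp) == 1:
-- 	    return 1
-- 	if len(mp) != 2:
-- 	    return 0
-- 	if mp[list(mp.keys())[0]] == 1 or mp[list(mp.keys())[0]] == (n // k - 1):
-- 	    return 1
-- 	return 0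
-- ===== SOURCE B (Python) =====
-- def kSubstrConcat(n, s, k):
--     # Sort the chunks, then scan the sorted list once collecting run lengths
--     # (group sizes); accept iff there is one group, or two with a singleton.
--     if n % k != 0:
--         return 0
--     chunks = sorted([s[i:i + k] for i in range(0, n, k)])
--     groups = []
--     prev = None
--     run = 0
--     for ch in chunks:
--         if run > 0 and ch != prev:
--             groups.append(run)
--             run = 0
--         run += 1
--         prev = ch
--     if run > 0:
--         groups.append(run)
--     if len(groups) == 1:
--         return 1
--     if len(groups) != 2:
--         return 0
--     return 1 if 1 in groups else 0
-- ===== Notes on version B (the rewrite author's own statement) =====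
-- stated objective: alternative
-- what changed: Replaces A's chunk-frequency dictionary with a sort-then-scan: the chunk list is sorted and a single pass over the sorted list collects the run lengths (group sizes); the answer is 1 iff there is exactly one group, or exactly two groups one of which has size 1 (instead of A's first-dict-key count == 1 or n//k-1).
import Mathlib
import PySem

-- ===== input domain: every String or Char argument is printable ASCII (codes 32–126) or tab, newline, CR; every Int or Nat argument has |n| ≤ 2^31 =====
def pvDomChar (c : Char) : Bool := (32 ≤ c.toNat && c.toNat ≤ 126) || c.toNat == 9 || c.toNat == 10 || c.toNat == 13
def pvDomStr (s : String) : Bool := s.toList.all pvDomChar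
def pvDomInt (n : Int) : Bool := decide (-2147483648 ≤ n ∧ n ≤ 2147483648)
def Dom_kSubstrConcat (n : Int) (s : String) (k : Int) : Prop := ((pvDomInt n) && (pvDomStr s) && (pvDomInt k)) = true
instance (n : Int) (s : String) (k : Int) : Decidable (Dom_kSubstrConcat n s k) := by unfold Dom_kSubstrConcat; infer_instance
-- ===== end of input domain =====

-- B replaces A's chunk-frequency dictionary by sort-then-scan: sort the chunk list and
-- collect the run lengths (group sizes) in one pass over the sorted list (objective: alternative).

-- ===== PORT A =====
def kSubstrConcat (n : Int) (s : String) (k : Int) : Int :=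
  if PySem.Int.mod n k ≠ 0 then 0
  else
    let mp := (PySem.List.pyRange 0 n k).foldl
      (fun mp i => mp.insert (PySem.Str.slice s (some i) (some (i + k)))
          (mp.getD (PySem.Str.slice s (some i) (some (i + k))) 0 + 1))
      PySem.Dict.empty
    if mp.size = 1 then 1
    else if mp.size ≠ 2 then 0
    -- mp[list(mp.keys())[0]] : the key is the first key of mp, so it is present and
    -- the lookup cannot raise; getD with default 0 returns exactly that stored value.
    else if mp.getD (PySem.List.pyGetD mp.keys 0 "") 0 = 1 ∨
            mp.getD (PySem.List.pyGetD mp.keys 0 "") 0 = PySem.Int.floordiv n k - 1 then 1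
    else 0

-- ===== PORT B =====
-- loop body of Source B's single pass over the sorted chunks: state (groups, prev, run);
-- 'prev' starts as None (no chunk seen yet), so it is an Option String.
def pvStepB (st : List Int × Option String × Int) (ch : String) : List Int × Option String × Int :=
  if 0 < st.2.2 ∧ some ch ≠ st.2.1 then (st.1 ++ [st.2.2], some ch, 1)
  else (st.1, some ch, st.2.2 + 1)

def kSubstrConcat_alt (n : Int) (s : String) (k : Int) : Int :=
  if PySem.Int.mod n k ≠ 0 then 0
  else
    let chunks := PySem.List.sorted
      ((PySem.List.pyRange 0 n k).map (fun i => PySem.Str.slice s (some i) (some (i + k))))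
      (fun x => x) false
    let st := chunks.foldl pvStepB ([], none, 0)
    let groups := if 0 < st.2.2 then st.1 ++ [st.2.2] else st.1
    if groups.length = 1 then 1
    else if groups.length ≠ 2 then 0
    else if (1 : Int) ∈ groups then 1 else 0

-- ===== PRECONDITION & SPEC =====
-- k = 0 makes 'n % k' raise ZeroDivisionError in Python; that is the only exception.
def Pre_kSubstrConcat (n : Int) (s : String) (k : Int) : Prop := k ≠ 0
instance (n : Int) (s : String) (k : Int) : Decidable (Pre_kSubstrConcat n s k) := by
  unfold Pre_kSubstrConcat; infer_instance

def pvWitness_kSubstrConcat : Int × String × Int := (6, "ababab", 2)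

def Spec_kSubstrConcat (n : Int) (s : String) (k : Int) (out : Int) : Prop := out = kSubstrConcat_alt n s k
instance (n : Int) (s : String) (k : Int) (out : Int) : Decidable (Spec_kSubstrConcat n s k out) := by unfold Spec_kSubstrConcat; infer_instance

-- ===== CLAIM (what is proved, stated in full; the proofs are below) =====
def Claim_equal_kSubstrConcat : Prop := ∀ (n : Int) (s : String) (k : Int), Dom_kSubstrConcat n s k → Pre_kSubstrConcat n s k → Spec_kSubstrConcat n s k (kSubstrConcat n s k)

-- ===== LEMMAS AND PROOFS =====

-- Run lengths of a list, as the natural recursion (spec of B's loop).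
def pvGo : List String → String → Int → List Int
  | [], _, run => [run]
  | ch :: rest, prev, run =>
    if ch = prev then pvGo rest prev (run + 1) else run :: pvGo rest ch 1

def pvRuns : List String → List Int
  | [] => []
  | a :: rest => pvGo rest a 1

-- The distinct values of a sorted list, in order (one per run).
def pvReps : List String → List String
  | [] => []
  | a :: rest => a :: pvReps (rest.dropWhile (· == a))
  termination_by l => l.length
  decreasing_by simpa [Nat.lt_succ_iff] using List.length_dropWhile_le (· == a) rest

def pvFlush (st : List Int × Option String × Int) : List Int :=
  if 0 < st.2.2 then st.1 ++ [st.2.2] else st.1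

lemma pvFoldB_go (rest : List String) (p : String) (r : Int) (g : List Int) (hr : 1 ≤ r) :
    pvFlush (rest.foldl pvStepB (g, some p, r)) = g ++ pvGo rest p r := by
  induction rest generalizing p r g with
  | nil => simp [pvFlush, pvGo]; omega
  | cons ch rest ih =>
    by_cases h : ch = p
    · subst h
      have : pvStepB (g, some ch, r) ch = (g, some ch, r + 1) := by simp [pvStepB]
      rw [List.foldl_cons, this, ih _ _ _ (by omega), pvGo, if_pos rfl]
    · have : pvStepB (g, some p, r) ch = (g ++ [r], some ch, 1) := by
        simp [pvStepB]; exact ⟨by omega, h⟩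
      rw [List.foldl_cons, this, ih _ _ _ le_rfl, pvGo, if_neg h, List.append_assoc,
        List.singleton_append]

lemma pvFoldB_runs (chunks : List String) :
    pvFlush (chunks.foldl pvStepB ([], none, 0)) = pvRuns chunks := by
  cases chunks with
  | nil => simp [pvFlush, pvRuns]
  | cons a rest =>
    have : pvStepB ([], none, 0) a = ([], some a, 1) := by simp [pvStepB]
    rw [List.foldl_cons, this, pvFoldB_go rest a 1 [] le_rfl, List.nil_append, pvRuns]

lemma pvGo_split (rest : List String) (prev : String) (run : Int) :
    pvGo rest prev run
      = (run + ((rest.takeWhile (· == prev)).length : Int))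
          :: pvRuns (rest.dropWhile (· == prev)) := by
  induction rest generalizing run with
  | nil => simp [pvGo, pvRuns]
  | cons ch rest ih =>
    by_cases h : ch = prev
    · subst h
      rw [pvGo, if_pos rfl, ih (run + 1), List.takeWhile_cons, List.dropWhile_cons]
      simp only [beq_self_eq_true, if_pos, List.length_cons]
      congr 1
      push_cast
      ring
    · have hb : (ch == prev) = false := by simp [h]
      rw [pvGo, if_neg h, List.takeWhile_cons, List.dropWhile_cons, hb]
      simp [pvRuns]

lemma pvMem_reps : ∀ (P : List String) (x : String), x ∈ pvReps P ↔ x ∈ P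
  | [], x => by simp [pvReps]
  | a :: rest, x => by
    rw [pvReps]
    have hlt : (rest.dropWhile (· == a)).length < rest.length + 1 :=
      Nat.lt_succ_of_le (List.length_dropWhile_le _ rest)
    constructor
    · intro hx
      rcases List.mem_cons.1 hx with h | h
      · simp [h]
      · have := (pvMem_reps _ x).1 h
        exact List.mem_cons.2 (Or.inr ((List.dropWhile_sublist (· == a)).mem this))
    · intro hx
      rcases List.mem_cons.1 hx with h | h
      · simp [h]
      · rw [← List.takeWhile_append_dropWhile (p := (· == a)) (l := rest)] at h
        rcases List.mem_append.1 h with h | h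
        · have := List.mem_takeWhile_imp h
          simp at this
          simp [this]
        · exact List.mem_cons.2 (Or.inr ((pvMem_reps _ x).2 h))
termination_by P => P.length

lemma pvNot_mem_dropWhile (rest : List String) (a : String)
    (hle : ∀ x ∈ rest, a ≤ x) (hp : rest.Pairwise (· ≤ ·)) :
    a ∉ rest.dropWhile (· == a) := by
  induction rest with
  | nil => simp
  | cons c r ih =>
    rw [List.dropWhile_cons]
    by_cases h : c = a
    · subst h
      simp only [beq_self_eq_true, if_pos]
      exact ih (fun x hx => hle x (List.mem_cons_of_mem _ hx)) (List.pairwise_cons.1 hp).2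
    · have hb : (c == a) = false := by simp [h]
      rw [hb]
      simp only [Bool.false_eq_true, if_false, List.mem_cons, not_or]
      refine ⟨fun hac => h hac.symm, fun hmem => ?_⟩
      have h1 : c ≤ a := (List.pairwise_cons.1 hp).1 a hmem
      have h2 : a ≤ c := hle c (List.mem_cons_self)
      exact h (le_antisymm h1 h2)

lemma pvReps_nodup : ∀ (P : List String), P.Pairwise (· ≤ ·) → (pvReps P).Nodup
  | [], _ => by simp [pvReps]
  | a :: rest, hp => by
    have hlt : (rest.dropWhile (· == a)).length < rest.length + 1 :=
      Nat.lt_succ_of_le (List.length_dropWhile_le _ rest)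
    rw [pvReps, List.nodup_cons]
    obtain ⟨hle, hprest⟩ := List.pairwise_cons.1 hp
    refine ⟨fun hmem => ?_, pvReps_nodup _ (hprest.sublist (List.dropWhile_sublist _))⟩
    exact pvNot_mem_dropWhile rest a hle hprest ((pvMem_reps _ a).1 hmem)
termination_by P => P.length

lemma pvRuns_spec : ∀ (P : List String), P.Pairwise (· ≤ ·) →
    pvRuns P = (pvReps P).map (fun v => (P.count v : Int))
  | [], _ => by simp [pvRuns, pvReps]
  | a :: rest, hp => by
    have hlt : (rest.dropWhile (· == a)).length < rest.length + 1 :=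
      Nat.lt_succ_of_le (List.length_dropWhile_le _ rest)
    obtain ⟨hle, hprest⟩ := List.pairwise_cons.1 hp
    have hdw : rest.takeWhile (· == a) ++ rest.dropWhile (· == a) = rest :=
      List.takeWhile_append_dropWhile
    have hnot : a ∉ rest.dropWhile (· == a) := pvNot_mem_dropWhile rest a hle hprest
    have htw : ∀ x ∈ rest.takeWhile (· == a), x = a := by
      intro x hx
      have := List.mem_takeWhile_imp hx
      simpa using this
    rw [pvRuns, pvGo_split, pvReps, List.map_cons]
    congr 1
    · -- head: count of a in P
      have h1 : List.count a (rest.takeWhile (· == a)) = (rest.takeWhile (· == a)).length :=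
        List.count_eq_length.2 (fun b hb => (htw b hb).symm)
      have h2 : List.count a (rest.dropWhile (· == a)) = 0 := List.count_eq_zero.2 hnot
      have h3 : List.count a rest = (rest.takeWhile (· == a)).length := by
        conv_lhs => rw [← hdw]
        rw [List.count_append, h1, h2]
        omega
      rw [List.count_cons]
      simp [h3]
      omega
    · -- tail: runs of the remainder
      rw [pvRuns_spec _ (hprest.sublist (List.dropWhile_sublist _))]
      apply List.map_congr_left
      intro v hv
      have hvdw : v ∈ rest.dropWhile (· == a) := (pvMem_reps _ v).1 hv
      have hva : v ≠ a := fun h => hnot (h ▸ hvdw)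
      have htw0 : List.count v (rest.takeWhile (· == a)) = 0 :=
        List.count_eq_zero.2 (fun hm => hva (htw v hm))
      have : List.count v rest = List.count v (rest.dropWhile (· == a)) := by
        conv_lhs => rw [← hdw]
        rw [List.count_append, htw0]
        omega
      have hav : ¬ a = v := fun hh => hva hh.symm
      rw [List.count_cons]
      simp [this, hav]
termination_by P => P.length

-- length of range(0, n, k) is n // k when k ∣ n and the range is nonempty
lemma pvRange_length (n k : Int) (hk : k ≠ 0) (hdvd : k ∣ n)
    (hne : PySem.List.pyRange 0 n k ≠ []) :
    ((PySem.List.pyRange 0 n k).length : Int) = PySem.Int.floordiv n k := by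
  obtain ⟨q, rfl⟩ := hdvd
  have hfd : PySem.Int.floordiv (k * q) k = q := by
    have h := PySem.Int.floordiv_mul_add_mod (k * q) k
    have hm : PySem.Int.mod (k * q) k = 0 := by
      rw [PySem.Int.mod_eq_zero_iff_dvd]; exact ⟨q, rfl⟩
    rw [hm, add_zero] at h
    exact mul_right_cancel₀ hk (h.trans (mul_comm k q))
  rw [hfd]
  rcases lt_or_gt_of_ne hk with hneg | hpos
  · simp only [PySem.List.pyRange, hk, if_false, not_lt.mpr (le_of_lt hneg)] at hne ⊢
    by_cases hq : k * q < 0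
    · simp only [zero_sub, if_pos hq, List.length_map, List.length_range] at *
      have hq0 : 0 < q := by nlinarith
      have : (-(k * q) + -k - 1) / (-k) = q := by
        have hkpos : 0 < -k := by omega
        have : -(k * q) + -k - 1 = (-k - 1) + (-k) * q := by ring
        rw [this, Int.add_mul_ediv_left _ _ (by omega : (-k) ≠ 0),
          Int.ediv_eq_zero_of_lt (by omega) (by omega), zero_add]
      rw [this]
      exact Int.toNat_of_nonneg (by omega)
    · simp [if_neg hq] at hne
  · simp only [PySem.List.pyRange, hk, if_false, if_pos hpos] at hne ⊢
    by_cases hq : 0 < k * q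
    · simp only [if_pos hq, List.length_map, List.length_range] at *
      have hq0 : 0 < q := by nlinarith
      have : (k * q - 0 + k - 1) / k = q := by
        have : k * q - 0 + k - 1 = (k - 1) + k * q := by ring
        rw [this, Int.add_mul_ediv_left _ _ hk,
          Int.ediv_eq_zero_of_lt (by omega) (by omega), zero_add]
      rw [this]
      exact Int.toNat_of_nonneg (by omega)
    · simp [if_neg hq] at hne

-- The common core: A's dict-based decision equals B's sorted-run decision, as a
-- function of the chunk list L and the chunk count m (= len(L) when L is nonempty).
lemma pvDecision_eq (L : List String) (m : Int) (hm : L ≠ [] → (L.length : Int) = m) :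
    (if (PySem.Dict.counter L).size = 1 then (1 : Int)
     else if (PySem.Dict.counter L).size ≠ 2 then 0
     else if (PySem.Dict.counter L).getD
              (PySem.List.pyGetD (PySem.Dict.counter L).keys 0 "") 0 = 1 ∨
            (PySem.Dict.counter L).getD
              (PySem.List.pyGetD (PySem.Dict.counter L).keys 0 "") 0 = m - 1 then 1
     else 0)
    = (if (pvRuns (PySem.List.sorted L (fun x => x) false)).length = 1 then 1
       else if (pvRuns (PySem.List.sorted L (fun x => x) false)).length ≠ 2 then 0
       else if (1 : Int) ∈ pvRuns (PySem.List.sorted L (fun x => x) false) then 1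
       else 0) := by
  set S := PySem.List.sorted L (fun x => x) false with hS
  have hperm : S.Perm L := PySem.List.sorted_perm L (fun x => x) false
  have hpair : S.Pairwise (· ≤ ·) := PySem.List.sorted_pairwise L (fun x => x)
  have hsizeK : (PySem.Dict.counter L).size = (PySem.Set.ofList L).length := by
    have : (PySem.Dict.counter L).size = (PySem.Dict.counter L).keys.length := by
      simp [PySem.Dict.size, PySem.Dict.keys]
    rw [this, PySem.Dict.keys_counter]
  have hruns : pvRuns S = (pvReps S).map (fun v => (S.count v : Int)) := pvRuns_spec S hpair
  have hlenG : (pvRuns S).length = (PySem.Set.ofList L).length := by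
    rw [hruns, List.length_map]
    have hperm2 : (pvReps S).Perm (PySem.Set.ofList L) := by
      rw [List.perm_ext_iff_of_nodup (pvReps_nodup S hpair) (PySem.Set.nodup_ofList L)]
      intro x
      rw [pvMem_reps, hperm.mem_iff, PySem.Set.mem_ofList]
    exact hperm2.length_eq
  by_cases h1 : (PySem.Set.ofList L).length = 1
  · rw [if_pos (hsizeK.trans h1), if_pos (hlenG.trans h1)]
  · by_cases h2 : (PySem.Set.ofList L).length = 2
    · obtain ⟨a, b, hab2⟩ := List.length_eq_two.1 h2
      have hnd := PySem.Set.nodup_ofList (α := String) L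
      rw [hab2] at hnd
      have hab : a ≠ b := by simp at hnd; exact hnd
      have haL : a ∈ L := (PySem.Set.mem_ofList L a).1 (by rw [hab2]; simp)
      have hbL : b ∈ L := (PySem.Set.mem_ofList L b).1 (by rw [hab2]; simp)
      have hall : ∀ x ∈ L, x = a ∨ x = b := by
        intro x hx
        have := (PySem.Set.mem_ofList L x).2 hx
        rw [hab2] at this
        simpa using this
      have hm' : (L.length : Int) = m := hm (by rintro rfl; simp at haL)
      have hca : 1 ≤ L.count a := List.count_pos_iff.2 haL
      have hcb : 1 ≤ L.count b := List.count_pos_iff.2 hbL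
      have hsum : L.count a + L.count b = L.length := by
        have hpart := List.length_eq_countP_add_countP (fun x => x == a) (l := L)
        have hq : L.countP (fun x => decide ¬(x == a) = true) = L.countP (fun x => x == b) := by
          apply List.countP_congr
          intro x hx
          rcases hall x hx with rfl | rfl
          · simpa using hab
          · simpa using Ne.symm hab
        rw [hq] at hpart
        rw [List.count_eq_countP, List.count_eq_countP]
        omega
      -- A's tested value is the count of the first key, i.e. of a
      have hkey : PySem.List.pyGetD (PySem.Dict.counter L).keys 0 "" = a := by
        rw [PySem.Dict.keys_counter, hab2,
          PySem.List.pyGetD_of_nonneg _ _ (by norm_num : (0:Int) ≤ 0)]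
        rfl
      have hgetD : (PySem.Dict.counter L).getD a 0 = (L.count a : Int) := by
        simpa using PySem.Dict.getD_counter L a
      -- B's test: 1 ∈ runs ↔ some distinct value has count 1
      have hmemG : (1 : Int) ∈ pvRuns S ↔ (L.count a = 1 ∨ L.count b = 1) := by
        rw [hruns, List.mem_map]
        constructor
        · rintro ⟨v, hv, hv1⟩
          have hvL : v ∈ L := hperm.mem_iff.1 ((pvMem_reps S v).1 hv)
          rw [hperm.count_eq] at hv1
          rcases hall v hvL with rfl | rfl
          · left; omega
          · right; omega
        · intro h
          rcases h with h | h
          · exact ⟨a, (pvMem_reps S a).2 (hperm.mem_iff.2 haL), by rw [hperm.count_eq, h]; simp⟩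
          · exact ⟨b, (pvMem_reps S b).2 (hperm.mem_iff.2 hbL), by rw [hperm.count_eq, h]; simp⟩
      have hAiff : ((PySem.Dict.counter L).getD (PySem.List.pyGetD (PySem.Dict.counter L).keys 0 "") 0 = 1 ∨
            (PySem.Dict.counter L).getD (PySem.List.pyGetD (PySem.Dict.counter L).keys 0 "") 0 = m - 1)
          ↔ (1 : Int) ∈ pvRuns S := by
        rw [hkey, hgetD, hmemG]
        omega
      rw [if_neg (by omega : ¬ (PySem.Dict.counter L).size = 1),
        if_neg (by omega : ¬ (PySem.Dict.counter L).size ≠ 2),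
        if_neg (by omega : ¬ (pvRuns S).length = 1),
        if_neg (by omega : ¬ (pvRuns S).length ≠ 2)]
      by_cases hA : (1 : Int) ∈ pvRuns S
      · rw [if_pos (hAiff.2 hA), if_pos hA]
      · rw [if_neg (fun h => hA (hAiff.1 h)), if_neg hA]
    · rw [if_neg (by omega : ¬ (PySem.Dict.counter L).size = 1),
        if_pos (by omega : (PySem.Dict.counter L).size ≠ 2),
        if_neg (by omega : ¬ (pvRuns S).length = 1),
        if_pos (by omega : (pvRuns S).length ≠ 2)]

-- ===== VERDICT (by name: the statement is the Claim_ definition above) =====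
theorem kSubstrConcat_spec : Claim_equal_kSubstrConcat := by
  intro n s k _ hk
  unfold Spec_kSubstrConcat kSubstrConcat kSubstrConcat_alt
  by_cases hmod : PySem.Int.mod n k = 0
  · simp only [hmod, ne_eq, not_true_eq_false, if_false]
    set chunk : Int → String := fun i => PySem.Str.slice s (some i) (some (i + k)) with hchunk
    set L : List String := (PySem.List.pyRange 0 n k).map chunk with hL
    have hfold : (PySem.List.pyRange 0 n k).foldl
        (fun mp i => mp.insert (chunk i) (mp.getD (chunk i) 0 + 1)) PySem.Dict.empty
        = PySem.Dict.counter L := by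
      rw [hL, ← PySem.Dict.foldl_insert_getD_add_one_eq_counter, List.foldl_map]
    have hm : L ≠ [] → (L.length : Int) = PySem.Int.floordiv n k := by
      intro hne
      rw [hL, List.length_map]
      apply pvRange_length n k hk ((PySem.Int.mod_eq_zero_iff_dvd n k).1 hmod)
      intro h
      exact hne (by rw [hL, h]; rfl)
    have hgroups : ∀ st : List Int × Option String × Int,
        (if 0 < st.2.2 then st.1 ++ [st.2.2] else st.1) = pvFlush st := fun _ => rfl
    rw [hfold, hgroups, pvFoldB_runs]
    exact pvDecision_eq L (PySem.Int.floordiv n k) hm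
  · simp [hmod]
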